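-- pv_equiv track=rewrite | github.com/PagePalApp/epub-cfi-toolkit | epub_cfi_toolkit/cfi_parser.py | _is_range_cfi
-- ===== SOURCE A (Python) =====
-- def _is_range_cfi(cfi: str) -> bool:
--     """Check if CFI uses range syntax with commas."""
--     # Range CFI has format: epubcfi(parent, start, end)
--     cleaned = cfi.strip()
--     if cleaned.startswith("epubcfi(") and cleaned.endswith(")"):
--         inner = cleaned[8:-1]
--         # Count non-escaped commas
--         comma_count = 0
--         i = 0
--         while i < len(inner):
--             if inner[i] == "," and (i == 0 or inner[i - 1] != "^"):
--                 comma_count += 1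
--             i += 1
--         return comma_count == 2
--     return False
-- ===== SOURCE B (Python) =====
-- def _is_range_cfi(cfi: str) -> bool:
--     """Check if CFI uses range syntax with commas."""
--     cleaned = cfi.strip()
--     if not (cleaned.startswith("epubcfi(") and cleaned.endswith(")")):
--         return False
--     # Split at every comma: each boundary between parts[i] and parts[i+1] is a
--     # comma, escaped exactly when the piece before it ends with a caret.
--     parts = cleaned[8:-1].split(",")
--     return sum(1 for p in parts[:-1] if not p.endswith("^")) == 2
-- ===== Notes on version B (the rewrite author's own statement) =====
-- stated objective: idiomatic
-- what changed: Replaced the index-walking while-loop comma counter with a split-based formulation: split the inner text at every comma and count the separators whose preceding piece does not end with a caret (an escaped comma is exactly one whose piece before it ends with '^').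
import Mathlib
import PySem

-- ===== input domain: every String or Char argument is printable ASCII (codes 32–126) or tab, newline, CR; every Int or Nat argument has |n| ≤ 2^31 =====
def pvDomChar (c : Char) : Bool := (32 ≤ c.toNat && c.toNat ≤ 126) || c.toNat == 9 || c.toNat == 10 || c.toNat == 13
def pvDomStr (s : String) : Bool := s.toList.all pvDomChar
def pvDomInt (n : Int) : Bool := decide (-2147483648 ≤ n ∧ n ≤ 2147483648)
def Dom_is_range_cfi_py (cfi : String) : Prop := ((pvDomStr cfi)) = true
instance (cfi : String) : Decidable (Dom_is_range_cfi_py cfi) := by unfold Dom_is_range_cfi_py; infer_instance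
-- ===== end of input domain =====

-- B replaces A's index-walking while-loop comma counter with a split-based formulation: split the
-- inner text at every comma and count the separators whose preceding piece does not end with '^';
-- idiomatic, same cost.

-- ===== PORT A =====
-- the while-loop: i walks 0..len-1, counting commas whose previous char is not '^'
def isRangeCfiLoop (inner : List Char) (i : Nat) (cc : Nat) : Nat :=
  if _h : i < inner.length then
    isRangeCfiLoop inner (i + 1)
      (if inner.getD i ' ' == ',' && (i == 0 || inner.getD (i - 1) ' ' != '^') then cc + 1 else cc)
  else cc
termination_by inner.length - i

def is_range_cfi_py (cfi : String) : Bool :=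
  let cleaned := PySem.Chars.strip cfi.toList
  if PySem.Chars.startswith cleaned "epubcfi(".toList && PySem.Chars.endswith cleaned ")".toList then
    let inner := PySem.List.slice cleaned (some 8) (some (-1))
    decide (isRangeCfiLoop inner 0 0 = 2)
  else false

-- ===== PORT B =====
def is_range_cfi_py_alt (cfi : String) : Bool :=
  let cleaned := PySem.Chars.strip cfi.toList
  if !(PySem.Chars.startswith cleaned "epubcfi(".toList && PySem.Chars.endswith cleaned ")".toList) then
    false
  else
    let parts := PySem.Chars.splitOn (PySem.List.slice cleaned (some 8) (some (-1))) [',']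
    decide ((parts.dropLast.filter (fun p => !(PySem.Chars.endswith p ['^']))).length = 2)

-- ===== PRECONDITION & SPEC =====
def Spec_is_range_cfi_py (cfi : String) (out : Bool) : Prop := out = is_range_cfi_py_alt cfi
instance (cfi : String) (out : Bool) : Decidable (Spec_is_range_cfi_py cfi out) := by unfold Spec_is_range_cfi_py; infer_instance

-- ===== CLAIM (what is proved, stated in full; the proofs are below) =====
def Claim_equal_is_range_cfi_py : Prop := ∀ (cfi : String), Dom_is_range_cfi_py cfi → Spec_is_range_cfi_py cfi (is_range_cfi_py cfi)

-- ===== LEMMAS AND PROOFS =====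

-- unescaped-comma count with an explicit "previous char was '^'" flag
def unescCount : List Char → Bool → Nat
  | [], _ => 0
  | c :: t, b => (if c = ',' ∧ b = false then 1 else 0) + unescCount t (c == '^')

-- structural version of Python's split(',')
def split1 : List Char → List (List Char)
  | [] => [[]]
  | c :: t => if c = ',' then [] :: split1 t else (split1 t).modifyHead (c :: ·)

-- number of pieces before the last one whose last char is not '^'
def cnt : List (List Char) → Nat
  | [] => 0
  | [_] => 0
  | p :: q :: r => (if p.getLast? == some '^' then 0 else 1) + cnt (q :: r)

theorem split1_ne_nil (l : List Char) : split1 l ≠ [] := by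
  induction l with
  | nil => simp [split1]
  | cons c t ih =>
    simp only [split1]
    split_ifs
    · simp
    · cases h : split1 t with
      | nil => exact absurd h ih
      | cons p ps => simp [List.modifyHead]

theorem split1_exists_cons (l : List Char) : ∃ p ps, split1 l = p :: ps := by
  cases h : split1 l with
  | nil => exact absurd h (split1_ne_nil l)
  | cons p ps => exact ⟨p, ps, rfl⟩

-- the loop of A computes unescCount of the remaining suffix
theorem loop_eq_unesc (inner : List Char) : ∀ (k i cc : Nat), i + k = inner.length →
    isRangeCfiLoop inner i cc
      = cc + unescCount (inner.drop i) (!(i == 0) && (inner.getD (i - 1) ' ' == '^')) := by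
  intro k
  induction k with
  | zero =>
    intro i cc h
    rw [isRangeCfiLoop]
    rw [dif_neg (by omega)]
    rw [List.drop_of_length_le (by omega)]
    simp [unescCount]
  | succ m ih =>
    intro i cc h
    have hi : i < inner.length := by omega
    rw [isRangeCfiLoop, dif_pos hi, ih (i + 1) _ (by omega)]
    rw [show List.drop i inner = inner.getD i ' ' :: List.drop (i + 1) inner from by
          rw [List.getD_eq_getElem _ _ hi]; exact List.drop_eq_getElem_cons hi]
    simp only [unescCount]
    have hflag : (!((i + 1) == 0) && (inner.getD (i + 1 - 1) ' ' == '^'))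
        = (inner.getD i ' ' == '^') := by simp
    rw [hflag]
    have hPC : (inner.getD i ' ' == ',' && (i == 0 || inner.getD (i - 1) ' ' != '^')) = true
        ↔ (inner.getD i ' ' = ',' ∧ (!(i == 0) && (inner.getD (i - 1) ' ' == '^')) = false) := by
      cases h0 : (i == 0 : Bool) <;> cases h4 : (inner.getD (i - 1) ' ' == '^') <;> simp_all
    by_cases hP : inner.getD i ' ' = ',' ∧ (!(i == 0) && (inner.getD (i - 1) ' ' == '^')) = false
    · rw [if_pos (hPC.mpr hP), if_pos hP]; omega
    · rw [if_neg (fun hh => hP (hPC.mp hh)), if_neg hP]; omega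

-- prepending a non-caret char to the first piece does not change cnt
theorem cnt_cons_head (c : Char) (hc : c ≠ '^') (p : List Char) (ps : List (List Char)) :
    cnt ((c :: p) :: ps) = cnt (p :: ps) := by
  cases ps with
  | nil => simp [cnt]
  | cons q r =>
    simp only [cnt]
    congr 1
    cases p with
    | nil => simp [hc]
    | cons d t => rw [List.getLast?_cons_cons]

-- prepending anything to a nonempty first piece does not change cnt
theorem cnt_cons_head_ne (c d : Char) (p : List Char) (ps : List (List Char)) :
    cnt ((c :: d :: p) :: ps) = cnt ((d :: p) :: ps) := by
  cases ps with
  | nil => simp [cnt]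
  | cons q r => simp only [cnt, List.getLast?_cons_cons]

-- key invariant: with a non-comma char d in front, cnt of the split equals unescCount with flag (d == '^')
theorem cnt_split1_cons (l : List Char) : ∀ (d : Char), d ≠ ',' →
    cnt (split1 (d :: l)) = unescCount l (d == '^') := by
  induction l with
  | nil =>
    intro d hd
    simp [split1, hd, unescCount, cnt]
  | cons c t ih =>
    intro d hd
    by_cases hc : c = ','
    · subst hc
      obtain ⟨p, ps, hp⟩ := split1_exists_cons t
      have hs : split1 (d :: ',' :: t) = [d] :: p :: ps := by
        simp [split1, hd, hp, List.modifyHead]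
      have hxt : cnt (split1 t) = unescCount t false := by
        have h := ih 'x' (by decide)
        have hsx : split1 ('x' :: t) = ('x' :: p) :: ps := by
          simp [split1, hp, List.modifyHead]
        rw [hsx, cnt_cons_head 'x' (by decide), ← hp] at h
        simpa using h
      rw [hs]
      simp only [cnt, unescCount]
      rw [hp] at hxt
      have hgl : ([d].getLast? == some '^') = (d == '^') := by simp
      rw [hgl, hxt]
      by_cases hdc : d = '^' <;> simp [hdc]
    · obtain ⟨p, ps, hp⟩ := split1_exists_cons t
      have hsc : split1 (c :: t) = (c :: p) :: ps := by
        simp [split1, hc, hp, List.modifyHead]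
      have hs : split1 (d :: c :: t) = (d :: c :: p) :: ps := by
        simp [split1, hd, hc, hp, List.modifyHead]
      rw [hs, cnt_cons_head_ne, ← hsc, ih c hc]
      simp [unescCount, hc]

theorem cnt_split1 (l : List Char) : cnt (split1 l) = unescCount l false := by
  cases l with
  | nil => simp [split1, cnt, unescCount]
  | cons c t =>
    by_cases hc : c = ','
    · subst hc
      obtain ⟨p, ps, hp⟩ := split1_exists_cons t
      have hs : split1 (',' :: t) = [] :: p :: ps := by simp [split1, hp]
      have hxt : cnt (split1 t) = unescCount t false := by
        have h := cnt_split1_cons t 'x' (by decide)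
        have hsx : split1 ('x' :: t) = ('x' :: p) :: ps := by
          simp [split1, hp, List.modifyHead]
        rw [hsx, cnt_cons_head 'x' (by decide), ← hp] at h
        simpa using h
      rw [hs]
      simp only [cnt, unescCount]
      rw [hp] at hxt
      simp [hxt]
    · rw [cnt_split1_cons t c hc]
      simp [unescCount, hc]

-- the fuel-based splitOn.go computes split1 (sep = [','])
theorem splitOnGo_eq (fuel : Nat) : ∀ (l cur : List Char) (acc : List (List Char)),
    l.length ≤ fuel →
    PySem.Chars.splitOn.go [','] fuel l cur acc
      = acc.reverse ++ (split1 l).modifyHead (cur.reverse ++ ·) := by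
  induction fuel with
  | zero =>
    intro l cur acc h
    have : l = [] := List.eq_nil_of_length_eq_zero (Nat.le_zero.mp h)
    subst this
    rw [PySem.Chars.splitOn.go]
    simp [split1, List.modifyHead]
  | succ n ih =>
    intro l cur acc h
    match l with
    | [] =>
      rw [PySem.Chars.splitOn.go.eq_def]
      simp [split1, List.modifyHead]
    | c :: rest =>
      rw [PySem.Chars.splitOn.go.eq_def]
      simp only []
      by_cases hc : c = ','
      · subst hc
        rw [if_pos (by simp [List.isPrefixOf])]
        simp only [List.length_cons, List.length_nil, List.drop_succ_cons, List.drop_zero]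
        rw [ih rest [] (cur.reverse :: acc) (by simp at h; omega)]
        obtain ⟨p, ps, hp⟩ := split1_exists_cons rest
        simp [split1, hp, List.modifyHead]
      · rw [if_neg (by simp [List.isPrefixOf]; exact fun hh => hc hh.symm)]
        rw [ih rest (c :: cur) acc (by simp at h; omega)]
        obtain ⟨p, ps, hp⟩ := split1_exists_cons rest
        simp [split1, hc, hp, List.modifyHead]

theorem splitOn_eq_split1 (l : List Char) : PySem.Chars.splitOn l [','] = split1 l := by
  rw [PySem.Chars.splitOn, splitOnGo_eq (l.length + 1) l [] [] (by omega)]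
  obtain ⟨p, ps, hp⟩ := split1_exists_cons l
  simp [hp, List.modifyHead]

theorem suffCaret (p : List Char) : ['^'] <:+ p ↔ p.getLast? = some '^' := by
  induction p with
  | nil => simp
  | cons c t ih =>
    cases t with
    | nil => simp [List.suffix_cons_iff, eq_comm]
    | cons d t' => rw [List.suffix_cons_iff]; simp [ih]

theorem endsCaret (p : List Char) : PySem.Chars.endswith p ['^'] = (p.getLast? == some '^') := by
  rw [PySem.Chars.endswith]
  by_cases hg : p.getLast? = some '^'
  · rw [List.isSuffixOf_iff_suffix.mpr ((suffCaret p).mpr hg)]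
    simp [hg]
  · have hb : ['^'].isSuffixOf p = false := by
      rw [Bool.eq_false_iff]
      intro hh
      exact hg ((suffCaret p).mp (List.isSuffixOf_iff_suffix.mp hh))
    rw [hb]
    simp [hg]

theorem filter_eq_cnt (pieces : List (List Char)) :
    (pieces.dropLast.filter (fun p => !(PySem.Chars.endswith p ['^']))).length = cnt pieces := by
  induction pieces with
  | nil => simp [cnt]
  | cons p rest ih =>
    cases rest with
    | nil => simp [cnt]
    | cons q r =>
      simp only [endsCaret] at ih ⊢
      rw [List.dropLast_cons_of_ne_nil (by simp), List.filter_cons]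
      by_cases hp : p.getLast? = some '^' <;> simp [hp, ih, cnt] <;> try omega

-- ===== VERDICT (by name: the statement is the Claim_ definition above) =====
theorem is_range_cfi_py_spec : Claim_equal_is_range_cfi_py := by
  intro cfi _
  unfold Spec_is_range_cfi_py
  simp only [is_range_cfi_py, is_range_cfi_py_alt]
  cases hg : (PySem.Chars.startswith (PySem.Chars.strip cfi.toList) "epubcfi(".toList
      && PySem.Chars.endswith (PySem.Chars.strip cfi.toList) ")".toList) with
  | false => simp
  | true =>
    simp only [Bool.not_true, Bool.false_eq_true, if_false, if_true]
    set inner := PySem.List.slice (PySem.Chars.strip cfi.toList) (some 8) (some (-1)) with hinner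
    have hloop := loop_eq_unesc inner inner.length 0 0 (by omega)
    simp only [List.drop_zero] at hloop
    have hf : (!((0 : Nat) == 0) && (inner.getD (0 - 1) ' ' == '^')) = false := by simp
    rw [hf] at hloop
    have hA : isRangeCfiLoop inner 0 0 = unescCount inner false := by omega
    have hB : ((PySem.Chars.splitOn inner [',']).dropLast.filter
          (fun p => !(PySem.Chars.endswith p ['^']))).length = unescCount inner false := by
      rw [splitOn_eq_split1, filter_eq_cnt, cnt_split1]
    rw [hA, hB]
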